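-- pv_equiv track=rewrite | github.com/megumi-ben/work13-wd | PNS/baselines/pns_pmns_v1/anchors.py | _extract_islands
-- ===== SOURCE A (Python) =====
-- from typing import Dict, List, Optional, Tuple
--
-- def _extract_islands(pattern: str) -> List[str]:
--     """Find segments wrapped by \y ... \y in order."""
--     islands: List[str] = []
--     idx = 0
--     while True:
--         start = pattern.find(r"\y", idx)
--         if start == -1:
--             break
--         end = pattern.find(r"\y", start + 2)
--         if end == -1:
--             break
--         content = pattern[start + 2 : end]
--         if content:
--             islands.append(content)
--         idx = end + 2
--     return islands
-- ===== SOURCE B (Python) =====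
-- from typing import List
--
-- def _extract_islands(pattern: str) -> List[str]:
--     """Find segments wrapped by \y ... \y in order."""
--     parts = pattern.split(r"\y")
--     islands: List[str] = []
--     inside = False
--     for part in parts[:-1]:
--         if inside and part:
--             islands.append(part)
--         inside = not inside
--     return islands
-- ===== Notes on version B (the rewrite author's own statement) =====
-- stated objective: idiomatic
-- what changed: Replaces the manual find/slice while-loop with a single str.split on the delimiter followed by a parity scan that keeps the non-empty pieces at odd positions (dropping the piece after the last delimiter).
import Mathlib
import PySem

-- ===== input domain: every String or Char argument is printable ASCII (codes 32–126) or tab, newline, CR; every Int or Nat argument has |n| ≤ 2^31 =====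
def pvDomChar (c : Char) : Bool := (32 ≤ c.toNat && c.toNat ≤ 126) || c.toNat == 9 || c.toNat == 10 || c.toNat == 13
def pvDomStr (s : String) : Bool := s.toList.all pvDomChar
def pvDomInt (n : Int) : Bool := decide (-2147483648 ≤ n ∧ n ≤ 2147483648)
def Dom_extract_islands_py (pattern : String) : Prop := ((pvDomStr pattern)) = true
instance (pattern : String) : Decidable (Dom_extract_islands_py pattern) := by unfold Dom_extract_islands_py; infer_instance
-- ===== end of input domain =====

-- B replaces A's manual find/slice while-loop by one split on the delimiter followed by a
-- parity scan keeping the non-empty odd-position pieces (idiomatic; same O(n) cost).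

-- ===== PORT A =====
-- A's while-loop; one fuel unit per iteration (fuel only makes the recursion total:
-- pattern.toList.length + 1 units are proved sufficient in pvAGo_spec below)
def pvAGo (pattern : String) : Nat → Int → List String → List String
  | 0, _, islands => islands
  | fuel + 1, idx, islands =>
    let start := PySem.Str.findFrom pattern "\\y" idx
    if start = -1 then islands
    else
      let e := PySem.Str.findFrom pattern "\\y" (start + 2)
      if e = -1 then islands
      else
        let content := PySem.Str.slice pattern (some (start + 2)) (some e)
        pvAGo pattern fuel (e + 2) (if content ≠ "" then islands ++ [content] else islands)

def extract_islands_py (pattern : String) : List String :=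
  pvAGo pattern (pattern.toList.length + 1) 0 []

-- ===== PORT B =====
def extract_islands_py_alt (pattern : String) : List String :=
  let parts := (PySem.Str.split? pattern "\\y").getD []
  let r := (PySem.List.slice parts none (some (-1))).foldl
      (fun (st : List String × Bool) part =>
        (if st.2 = true ∧ part ≠ "" then st.1 ++ [part] else st.1, !st.2))
      ([], false)
  r.1

-- ===== PRECONDITION & SPEC =====
def Spec_extract_islands_py (pattern : String) (out : List String) : Prop := out = extract_islands_py_alt pattern
instance (pattern : String) (out : List String) : Decidable (Spec_extract_islands_py pattern out) := by unfold Spec_extract_islands_py; infer_instance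

-- ===== CLAIM (what is proved, stated in full; the proofs are below) =====
def Claim_equal_extract_islands_py : Prop := ∀ (pattern : String), Dom_extract_islands_py pattern → Spec_extract_islands_py pattern (extract_islands_py pattern)

-- ===== LEMMAS AND PROOFS =====

def pvSep : List Char := ['\\', 'y']

lemma pvFind_facts (s : List Char) (h : PySem.Chars.find s pvSep ≠ -1) :
    0 ≤ PySem.Chars.find s pvSep ∧
    (PySem.Chars.find s pvSep).toNat + 2 ≤ s.length ∧
    pvSep <+: s.drop (PySem.Chars.find s pvSep).toNat := by
  have h0 : 0 ≤ PySem.Chars.find s pvSep := by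
    have := PySem.Chars.neg_one_le_find s pvSep; omega
  obtain ⟨hp, -⟩ := PySem.Chars.find_spec h0
  refine ⟨h0, ?_, hp⟩
  have hl := hp.length_le
  rw [List.length_drop] at hl
  have h2 : pvSep.length = 2 := rfl
  have h3 := PySem.Chars.find_le_length s pvSep
  omega

def pvPieces (s : List Char) : List (List Char) :=
  if h1 : PySem.Chars.find s pvSep = -1 then [s]
  else
    s.take (PySem.Chars.find s pvSep).toNat ::
      pvPieces (s.drop ((PySem.Chars.find s pvSep).toNat + 2))
termination_by s.length
decreasing_by
  obtain ⟨-, hb, -⟩ := pvFind_facts s h1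
  simp only [List.length_drop]
  omega

lemma pvFind_go_shift (l : List Char) (k : Nat) :
    PySem.Chars.find.go pvSep l k =
      if PySem.Chars.find l pvSep = -1 then -1 else k + PySem.Chars.find l pvSep := by
  induction l generalizing k with
  | nil => simp [PySem.Chars.find, PySem.Chars.find.go, pvSep]
  | cons c t ih =>
    rw [PySem.Chars.find.go]
    conv_rhs => rw [PySem.Chars.find, PySem.Chars.find.go]
    by_cases hp : pvSep.isPrefixOf (c :: t) = true
    · simp [hp]
    · simp only [Bool.not_eq_true] at hp
      simp only [hp, if_false, ih (k+1), ih 1]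
      have := PySem.Chars.neg_one_le_find t pvSep
      rw [show PySem.Chars.find t pvSep = PySem.Chars.find.go pvSep t 0 from rfl, ih 0]
      split <;> split <;> omega

lemma pvFind_cons (c : Char) (rest : List Char) :
    PySem.Chars.find (c :: rest) pvSep =
      if pvSep.isPrefixOf (c :: rest) then 0
      else if PySem.Chars.find rest pvSep = -1 then -1 else 1 + PySem.Chars.find rest pvSep := by
  rw [PySem.Chars.find, PySem.Chars.find.go]
  split
  · rfl
  · exact pvFind_go_shift rest 1

lemma pvModifyHead_id {α : Type} (l : List α) : List.modifyHead (fun x => x) l = l := by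
  cases l <;> simp

lemma pvGo_spec (fuel : Nat) (l cur : List Char) (acc : List (List Char)) (hf : l.length < fuel) :
    PySem.Chars.splitOn.go pvSep fuel l cur acc =
      acc.reverse ++ (pvPieces l).modifyHead (cur.reverse ++ ·) := by
  induction fuel generalizing l cur acc with
  | zero => omega
  | succ fuel ih =>
    match l with
    | [] =>
      have hg : PySem.Chars.splitOn.go pvSep (fuel + 1) [] cur acc
          = (cur.reverse :: acc).reverse := rfl
      have hfind : PySem.Chars.find ([] : List Char) pvSep = -1 := by
        simp [PySem.Chars.find, PySem.Chars.find.go, pvSep]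
      rw [hg, pvPieces]
      simp [hfind]
    | c :: t =>
      by_cases hp : pvSep.isPrefixOf (c :: t) = true
      · have hg : PySem.Chars.splitOn.go pvSep (fuel + 1) (c :: t) cur acc
            = PySem.Chars.splitOn.go pvSep fuel (List.drop pvSep.length (c :: t)) []
                (cur.reverse :: acc) := by
          rw [PySem.Chars.splitOn.go]; simp [hp]
        have hpre : pvSep <+: (c :: t) := List.isPrefixOf_iff_prefix.mp hp
        have hlen2 : pvSep.length ≤ (c :: t).length := hpre.length_le
        have hsl : pvSep.length = 2 := rfl
        have hfind : PySem.Chars.find (c :: t) pvSep = 0 := by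
          rw [pvFind_cons]; simp [hp]
        rw [hg, ih _ _ _ (by simp only [List.length_drop]; omega)]
        conv_rhs => rw [pvPieces]
        simp [hfind, hsl, pvModifyHead_id]
      · simp only [Bool.not_eq_true] at hp
        have hg : PySem.Chars.splitOn.go pvSep (fuel + 1) (c :: t) cur acc
            = PySem.Chars.splitOn.go pvSep fuel t (c :: cur) acc := by
          rw [PySem.Chars.splitOn.go]; simp [hp]
        have hfl : (c :: t).length < fuel + 1 := hf
        rw [hg, ih _ _ _ (by simp at hfl ⊢; omega)]
        have hfind := pvFind_cons c t
        rw [hp] at hfind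
        simp only [Bool.false_eq_true, if_false] at hfind
        conv_rhs => rw [pvPieces]
        by_cases h2 : PySem.Chars.find t pvSep = -1
        · rw [pvPieces]
          simp [hfind, h2]
        · have hnn : 0 ≤ PySem.Chars.find t pvSep := by
            have := PySem.Chars.neg_one_le_find t pvSep; omega
          have hne : PySem.Chars.find (c :: t) pvSep ≠ -1 := by rw [hfind]; simp [h2]; omega
          rw [pvPieces]
          simp only [hfind, h2, if_false, dif_neg hne, dif_neg h2]
          have ht1 : (1 + PySem.Chars.find t pvSep).toNat = (PySem.Chars.find t pvSep).toNat + 1 := by omega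
          have h3 : ¬(1 + PySem.Chars.find t pvSep = -1) := by omega
          simp [ht1, List.modifyHead, h3]

lemma pvSplitOn_eq_pieces (s : List Char) : PySem.Chars.splitOn s pvSep = pvPieces s := by
  have h := pvGo_spec (s.length + 1) s [] [] (by omega)
  rw [show PySem.Chars.splitOn s pvSep = PySem.Chars.splitOn.go pvSep (s.length + 1) s [] [] from rfl, h]
  cases hp : pvPieces s <;> simp

lemma pvPieces_ne_nil (s : List Char) : pvPieces s ≠ [] := by
  rw [pvPieces]; split <;> simp

def pvIsl (s : List Char) : List (List Char) :=
  if h1 : PySem.Chars.find s pvSep = -1 then []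
  else
    let rest := s.drop ((PySem.Chars.find s pvSep).toNat + 2)
    if h2 : PySem.Chars.find rest pvSep = -1 then []
    else
      let en := (PySem.Chars.find rest pvSep).toNat
      (if rest.take en ≠ [] then [rest.take en] else []) ++ pvIsl (rest.drop (en + 2))
termination_by s.length
decreasing_by
  obtain ⟨-, hb, -⟩ := pvFind_facts s h1
  simp only [List.length_drop]
  omega

def pvPf (inside : Bool) : List (List Char) → List (List Char)
  | [] => []
  | p :: t => (if inside = true ∧ p ≠ [] then [p] else []) ++ pvPf (!inside) t

lemma pvPf_pieces_aux (n : Nat) : ∀ (s : List Char), s.length ≤ n →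
    pvPf false ((pvPieces s).dropLast) = pvIsl s := by
  induction n with
  | zero =>
    intro s hs
    have hs0 : s = [] := by cases s <;> simp_all
    subst hs0
    have hfind : PySem.Chars.find ([] : List Char) pvSep = -1 := by
      simp [PySem.Chars.find, PySem.Chars.find.go, pvSep]
    rw [pvPieces, pvIsl]
    simp [hfind, pvPf]
  | succ n ih =>
    intro s hs
    rw [pvPieces, pvIsl]
    by_cases h1 : PySem.Chars.find s pvSep = -1
    · simp [h1, pvPf]
    · obtain ⟨hnn1, hb1, -⟩ := pvFind_facts s h1
      simp only [dif_neg h1]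
      set rest := s.drop ((PySem.Chars.find s pvSep).toNat + 2) with hrest
      by_cases h2 : PySem.Chars.find rest pvSep = -1
      · rw [pvPieces]
        simp [h2, pvPf]
      · obtain ⟨hnn2, hb2, -⟩ := pvFind_facts rest h2
        rw [pvPieces]
        simp only [dif_neg h2]
        set en := (PySem.Chars.find rest pvSep).toNat with hen
        set rest2 := rest.drop (en + 2) with hrest2
        cases hq : pvPieces rest2 with
        | nil => exact absurd hq (pvPieces_ne_nil rest2)
        | cons b q =>
          have hlen : rest2.length ≤ n := by
            have : rest.length = s.length - ((PySem.Chars.find s pvSep).toNat + 2) := by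
              rw [hrest, List.length_drop]
            have : rest2.length = rest.length - (en + 2) := by
              rw [hrest2, List.length_drop]
            omega
          have := ih rest2 hlen
          have hdl : (s.take (PySem.Chars.find s pvSep).toNat :: rest.take en :: pvPieces rest2).dropLast
              = s.take (PySem.Chars.find s pvSep).toNat :: rest.take en :: (pvPieces rest2).dropLast := by
            rw [hq]; simp
          rw [← hq, hdl]
          simp [pvPf, this]

lemma pvSlice_dropLast {α : Type} (xs : List α) :
    PySem.List.slice xs none (some (-1)) = xs.dropLast := by
  rcases xs with _ | ⟨x, t⟩
  · rfl
  · simp only [PySem.List.slice, PySem.List.clampIdx, List.dropLast_eq_take]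
    norm_num
    rw [if_neg (by omega : ¬((t.length : Int) < 0))]
    omega

lemma pvStr_ne_empty_iff (s : String) : (s ≠ "") ↔ s.toList ≠ [] := by
  constructor <;> intro h hc <;> apply h
  · exact String.ext (by simp [hc])
  · simp [hc]

lemma pvFoldl_pf (ps : List String) (acc : List String) (b : Bool) :
    (ps.foldl (fun (st : List String × Bool) part =>
        (if st.2 = true ∧ part ≠ "" then st.1 ++ [part] else st.1, !st.2)) (acc, b)).1
      = acc ++ (pvPf b (ps.map String.toList)).map String.ofList := by
  induction ps generalizing acc b with
  | nil => simp [pvPf]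
  | cons p t ih =>
    simp only [List.foldl_cons, List.map_cons, pvPf, ih]
    by_cases hb : b = true
    · by_cases hp : p ≠ ""
      · have hp' : p.toList ≠ [] := (pvStr_ne_empty_iff p).mp hp
        simp [hb, hp, hp']
      · have hp' : ¬ p.toList ≠ [] := fun h => h (by simp [not_not.mp hp])
        simp [hb, hp, hp']
    · simp [hb]

lemma pvAlt_spec (pattern : String) :
    extract_islands_py_alt pattern =
      (pvPf false ((PySem.Chars.splitOn pattern.toList pvSep).dropLast)).map String.ofList := by
  have hsep : ("\\y" : String).toList = pvSep := rfl
  have hsplit := PySem.Str.split?_map pattern "\\y"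
  rw [hsep, PySem.Chars.split?] at hsplit
  simp only [show pvSep.isEmpty = false from rfl, Bool.false_eq_true, if_false] at hsplit
  obtain ⟨ps, hps, hmap⟩ : ∃ ps, PySem.Str.split? pattern "\\y" = some ps ∧
      ps.map String.toList = PySem.Chars.splitOn pattern.toList pvSep := by
    cases h : PySem.Str.split? pattern "\\y" with
    | none => rw [h] at hsplit; simp at hsplit
    | some ps => rw [h] at hsplit; exact ⟨ps, rfl, by simpa using hsplit⟩
  unfold extract_islands_py_alt
  rw [hps]
  simp only [Option.getD_some, pvSlice_dropLast]
  rw [pvFoldl_pf]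
  rw [← hmap, ← List.map_dropLast]
  simp

lemma pvAGo_spec (pattern : String) (fuel k : Nat) (acc : List String)
    (hk : k ≤ pattern.toList.length) (hf : pattern.toList.length - k < fuel) :
    pvAGo pattern fuel (k : Int) acc
      = acc ++ (pvIsl (pattern.toList.drop k)).map String.ofList := by
  induction fuel generalizing k acc with
  | zero => omega
  | succ fuel ih =>
    have hsep : ("\\y" : String).toList = pvSep := rfl
    set s := pattern.toList with hs
    rw [pvAGo]
    simp only [PySem.Str.findFrom_eq, hsep, ← hs]
    rw [PySem.Chars.findFrom_natCast s pvSep k hk]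
    by_cases h1 : PySem.Chars.find (s.drop k) pvSep = -1
    · rw [pvIsl]
      simp [h1]
    · obtain ⟨hnn1, hb1, -⟩ := pvFind_facts (s.drop k) h1
      rw [List.length_drop] at hb1
      rw [if_neg h1]
      have hstart : ¬((k : Int) + PySem.Chars.find (s.drop k) pvSep = -1) := by omega
      rw [if_neg hstart]
      have hk' : k + (PySem.Chars.find (s.drop k) pvSep).toNat + 2 ≤ s.length := by omega
      set k' : Nat := k + (PySem.Chars.find (s.drop k) pvSep).toNat + 2 with hk'def
      have hcast : (k : Int) + PySem.Chars.find (s.drop k) pvSep + 2 = ((k' : Nat) : Int) := by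
        rw [hk'def]; push_cast; omega
      rw [hcast, PySem.Chars.findFrom_natCast s pvSep k' hk']
      have hrest : s.drop k' = (s.drop k).drop ((PySem.Chars.find (s.drop k) pvSep).toNat + 2) := by
        rw [List.drop_drop, hk'def]; ring_nf
      by_cases h2 : PySem.Chars.find (s.drop k') pvSep = -1
      · rw [if_pos h2, if_pos rfl, pvIsl, dif_neg h1]
        have h2' : PySem.Chars.find
            (List.drop (k + ((PySem.Chars.find (s.drop k) pvSep).toNat + 2)) s) pvSep = -1 := by
          have hx : k + ((PySem.Chars.find (s.drop k) pvSep).toNat + 2) = k' := by omega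
          rw [hx]; exact h2
        simp [h2']
      · obtain ⟨hnn2, hb2, -⟩ := pvFind_facts (s.drop k') h2
        rw [List.length_drop] at hb2
        rw [if_neg h2]
        have he : ¬((k' : Int) + PySem.Chars.find (s.drop k') pvSep = -1) := by omega
        rw [if_neg he]
        set f2 : Nat := (PySem.Chars.find (s.drop k') pvSep).toNat with hf2def
        have hcontent : (PySem.Str.slice pattern (some ((k' : Int)))
              (some ((k' : Int) + PySem.Chars.find (s.drop k') pvSep))).toList
            = (s.drop k').take f2 := by
          rw [PySem.Str.toList_slice, PySem.Chars.slice_eq_listSlice, ← hs]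
          simp only [PySem.List.slice]
          have hc1 : PySem.List.clampIdx s.length ((k' : Nat) : Int) = k' := by
            unfold PySem.List.clampIdx
            rw [if_neg (by omega : ¬(((k' : Nat) : Int) < 0))]
            omega
          have hc2 : PySem.List.clampIdx s.length ((k' : Int) + PySem.Chars.find (s.drop k') pvSep)
              = k' + f2 := by
            unfold PySem.List.clampIdx
            rw [if_neg (by omega)]
            omega
          rw [hc1, hc2]
          congr 1
          omega
        have hcnt_eq : PySem.Str.slice pattern (some ((k' : Int)))
              (some ((k' : Int) + PySem.Chars.find (s.drop k') pvSep))
            = String.ofList ((s.drop k').take f2) := String.ext (by rw [hcontent]; simp)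
        have hcast2 : (k' : Int) + PySem.Chars.find (s.drop k') pvSep + 2
            = ((k' + f2 + 2 : Nat) : Int) := by push_cast; omega
        rw [hcast2, ih (k' + f2 + 2) _ (by omega) (by omega)]
        conv_rhs => rw [pvIsl]
        rw [dif_neg h1]
        simp only [← hrest, hf2def]
        rw [dif_neg h2]
        have hdd : s.drop (k' + f2 + 2) = (s.drop k').drop (f2 + 2) := by
          rw [List.drop_drop, Nat.add_assoc]
        rw [← hdd, hcnt_eq]
        have hfx : k' + (PySem.Chars.find (List.drop k' s) pvSep).toNat + 2 = k' + f2 + 2 := by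
          rw [← hf2def]
        by_cases hne : (s.drop k').take f2 = []
        · have hlen := congrArg List.length hne
          simp at hlen
          have hcond : ¬(0 < PySem.Chars.find (List.drop k' s) pvSep ∧ k' < s.length) := by
            intro ⟨hpos, _⟩
            omega
          simp [hne, hcond, hfx]
        · have hf0 : f2 ≠ 0 := by intro h; rw [h] at hne; simp at hne
          have hcond : 0 < PySem.Chars.find (List.drop k' s) pvSep ∧ k' < s.length :=
            ⟨by omega, by omega⟩
          have hstr : String.ofList ((s.drop k').take f2) ≠ "" := by
            rw [pvStr_ne_empty_iff]; simpa using hne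
          simp [hstr, hcond, hfx]
          rw [hf2def]

-- ===== VERDICT (by name: the statement is the Claim_ definition above) =====
theorem extract_islands_py_spec : Claim_equal_extract_islands_py := by
  intro pattern _
  unfold Spec_extract_islands_py extract_islands_py
  have hA := pvAGo_spec pattern (pattern.toList.length + 1) 0 [] (by omega) (by omega)
  rw [show ((0 : Nat) : Int) = 0 from rfl] at hA
  rw [hA, pvAlt_spec pattern, pvSplitOn_eq_pieces, List.drop_zero,
    pvPf_pieces_aux pattern.toList.length pattern.toList le_rfl]
  simp
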